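-- pv_equiv track=rewrite | github.com/sanjaybommalene/practiceproblems | Searching Algorithms.py | longest_sequence_recursive
-- ===== SOURCE A (Python) =====
-- def longest_sequence_recursive(arr, left, right, prev):
--     # Base case: if pointers cross each other
--     if left > right:
--         return 0
--
--     count1 = count2 = 0
--
--     # Take the left element if it can be part of LIS
--     if arr[left] > prev:
--         count1 = 1 + longest_sequence_recursive(arr, left + 1, right, arr[left])
--
--     # Take the right element if it can be part of LIS
--     if arr[right] > prev:
--         count2 = 1 + longest_sequence_recursive(arr, left, right - 1, arr[right])
--
--     # Return the maximum of both choices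
--     return max(count1, count2)
-- ===== SOURCE B (Python) =====
-- def longest_sequence_recursive(arr, left, right, prev):
--     # Memoized top-down DP over (l, r, p): same answer as the plain recursion,
--     # but each distinct state is solved once.
--     memo = {}
--
--     def go(l, r, p):
--         if l > r:
--             return 0
--         key = (l, r, p)
--         if key in memo:
--             return memo[key]
--         c1 = 1 + go(l + 1, r, arr[l]) if arr[l] > p else 0
--         c2 = 1 + go(l, r - 1, arr[r]) if arr[r] > p else 0
--         res = c1 if c1 > c2 else c2
--         memo[key] = res
--         return res
--
--     return go(left, right, prev)
-- ===== Notes on version B (the rewrite author's own statement) =====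
-- stated objective: alternative
-- what changed: Replaced the plain branching recursion by a top-down dynamic program memoized on the state (left, right, prev), so each distinct state is solved once.
import Mathlib
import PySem

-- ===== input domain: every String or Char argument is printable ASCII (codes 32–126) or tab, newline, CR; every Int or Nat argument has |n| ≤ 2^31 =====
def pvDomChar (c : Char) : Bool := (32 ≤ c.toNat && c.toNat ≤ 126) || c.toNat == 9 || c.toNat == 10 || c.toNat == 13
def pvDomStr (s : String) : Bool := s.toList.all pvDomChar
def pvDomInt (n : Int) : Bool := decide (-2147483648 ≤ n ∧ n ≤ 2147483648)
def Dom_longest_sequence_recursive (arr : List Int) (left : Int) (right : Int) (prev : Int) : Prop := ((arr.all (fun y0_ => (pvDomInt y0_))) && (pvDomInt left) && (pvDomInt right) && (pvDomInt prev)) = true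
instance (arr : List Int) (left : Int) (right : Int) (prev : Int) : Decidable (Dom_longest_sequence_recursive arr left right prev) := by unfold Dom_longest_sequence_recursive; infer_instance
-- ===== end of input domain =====

-- B replaces A's plain branching recursion by a top-down DP memoized on (left, right, prev); same values, each distinct state solved once (objective: alternative).

-- ===== PORT A =====
-- arr[i] is ported as PySem.List.pyGetD arr i 0; Pre_ restricts to the inputs where every access is in range (Python raises IndexError otherwise).
def longest_sequence_recursive (arr : List Int) (left : Int) (right : Int) (prev : Int) : Int :=
  if left > right then 0
  else
    let count1 : Int :=
      if PySem.List.pyGetD arr left 0 > prev then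
        1 + longest_sequence_recursive arr (left + 1) right (PySem.List.pyGetD arr left 0)
      else 0
    let count2 : Int :=
      if PySem.List.pyGetD arr right 0 > prev then
        1 + longest_sequence_recursive arr left (right - 1) (PySem.List.pyGetD arr right 0)
      else 0
    max count1 count2
termination_by (right - left + 1).toNat
decreasing_by all_goals omega

-- ===== PORT B =====
-- go threads the Python memo dict functionally.
def pvGo (arr : List Int) (l r p : Int) (memo : PySem.Dict (Int × Int × Int) Int) :
    Int × PySem.Dict (Int × Int × Int) Int :=
  if l > r then (0, memo)
  else
    match memo.get? (l, r, p) with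
    | some v => (v, memo)
    | none =>
      let t1 : Int × PySem.Dict (Int × Int × Int) Int :=
        if PySem.List.pyGetD arr l 0 > p then
          let u := pvGo arr (l + 1) r (PySem.List.pyGetD arr l 0) memo
          (1 + u.1, u.2)
        else (0, memo)
      let t2 : Int × PySem.Dict (Int × Int × Int) Int :=
        if PySem.List.pyGetD arr r 0 > p then
          let u := pvGo arr l (r - 1) (PySem.List.pyGetD arr r 0) t1.2
          (1 + u.1, u.2)
        else (0, t1.2)
      let res := if t1.1 > t2.1 then t1.1 else t2.1
      (res, t2.2.insert (l, r, p) res)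
termination_by (r - l + 1).toNat
decreasing_by all_goals omega

def longest_sequence_recursive_alt (arr : List Int) (left : Int) (right : Int) (prev : Int) : Int :=
  (pvGo arr left right prev PySem.Dict.empty).1

-- ===== PRECONDITION & SPEC =====
-- Pre_ excludes exactly the inputs on which Python A raises IndexError (an end index out of range while left ≤ right).
def Pre_longest_sequence_recursive (arr : List Int) (left : Int) (right : Int) (prev : Int) : Prop :=
  left > right ∨ (-(arr.length : Int) ≤ left ∧ right < (arr.length : Int))
instance (arr : List Int) (left : Int) (right : Int) (prev : Int) : Decidable (Pre_longest_sequence_recursive arr left right prev) := by unfold Pre_longest_sequence_recursive; infer_instance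

def pvWitness_longest_sequence_recursive : List Int × Int × Int × Int := ([1, 3, 2], 0, 2, 0)

def Spec_longest_sequence_recursive (arr : List Int) (left : Int) (right : Int) (prev : Int) (out : Int) : Prop := out = longest_sequence_recursive_alt arr left right prev
instance (arr : List Int) (left : Int) (right : Int) (prev : Int) (out : Int) : Decidable (Spec_longest_sequence_recursive arr left right prev out) := by unfold Spec_longest_sequence_recursive; infer_instance

-- ===== CLAIM (what is proved, stated in full; the proofs are below) =====
def Claim_equal_longest_sequence_recursive : Prop := ∀ (arr : List Int) (left : Int) (right : Int) (prev : Int), Dom_longest_sequence_recursive arr left right prev → Pre_longest_sequence_recursive arr left right prev → Spec_longest_sequence_recursive arr left right prev (longest_sequence_recursive arr left right prev)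

-- ===== LEMMAS AND PROOFS =====

-- The memo invariant: every cached value is the plain recursion's value.
def pvInv (arr : List Int) (m : PySem.Dict (Int × Int × Int) Int) : Prop :=
  ∀ l r p v, m.get? (l, r, p) = some v → v = longest_sequence_recursive arr l r p

theorem pv_if_gt_eq_max (a b : Int) : (if a > b then a else b) = max a b := by
  rw [max_def]; split_ifs <;> omega

theorem pvGo_aux (arr : List Int) : ∀ (n : Nat) (l r p : Int) (m : PySem.Dict (Int × Int × Int) Int),
    (r - l + 1).toNat ≤ n → pvInv arr m →
    (pvGo arr l r p m).1 = longest_sequence_recursive arr l r p ∧ pvInv arr (pvGo arr l r p m).2 := by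
  intro n
  induction n with
  | zero =>
    intro l r p m hn hm
    have hl : l > r := by omega
    rw [pvGo, longest_sequence_recursive]
    simp [hl, hm]
  | succ n ih =>
    intro l r p m hn hm
    rw [pvGo]
    by_cases hl : l > r
    · rw [longest_sequence_recursive]
      simp [hl, hm]
    · simp only [hl, if_false]
      cases hmem : m.get? (l, r, p) with
      | some v =>
        exact ⟨hm l r p v hmem, hm⟩
      | none =>
        have hA : longest_sequence_recursive arr l r p =
            max (if PySem.List.pyGetD arr l 0 > p then
                   1 + longest_sequence_recursive arr (l + 1) r (PySem.List.pyGetD arr l 0) else 0)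
                (if PySem.List.pyGetD arr r 0 > p then
                   1 + longest_sequence_recursive arr l (r - 1) (PySem.List.pyGetD arr r 0) else 0) := by
          conv_lhs => rw [longest_sequence_recursive]
          simp [hl]
        by_cases hc1 : PySem.List.pyGetD arr l 0 > p <;>
          by_cases hc2 : PySem.List.pyGetD arr r 0 > p
        · obtain ⟨e1, i1⟩ := ih (l + 1) r (PySem.List.pyGetD arr l 0) m (by omega) hm
          obtain ⟨e2, i2⟩ := ih l (r - 1) (PySem.List.pyGetD arr r 0) _ (by omega) i1
          simp only [hc1, hc2, if_true, if_false] at hA ⊢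
          rw [e1, e2, pv_if_gt_eq_max, ← hA]
          refine ⟨rfl, ?_⟩
          intro l' r' p' v hv
          rw [PySem.Dict.get?_insert] at hv
          split_ifs at hv with heq
          · obtain ⟨h1, h2, h3⟩ : l' = l ∧ r' = r ∧ p' = p := by simpa using heq
            subst h1; subst h2; subst h3
            exact (Option.some.inj hv).symm
          · exact i2 l' r' p' v hv
        · obtain ⟨e1, i1⟩ := ih (l + 1) r (PySem.List.pyGetD arr l 0) m (by omega) hm
          simp only [hc1, hc2, if_true, if_false] at hA ⊢
          rw [e1, pv_if_gt_eq_max, ← hA]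
          refine ⟨rfl, ?_⟩
          intro l' r' p' v hv
          rw [PySem.Dict.get?_insert] at hv
          split_ifs at hv with heq
          · obtain ⟨h1, h2, h3⟩ : l' = l ∧ r' = r ∧ p' = p := by simpa using heq
            subst h1; subst h2; subst h3
            exact (Option.some.inj hv).symm
          · exact i1 l' r' p' v hv
        · obtain ⟨e2, i2⟩ := ih l (r - 1) (PySem.List.pyGetD arr r 0) m (by omega) hm
          simp only [hc1, hc2, if_true, if_false] at hA ⊢
          rw [e2, pv_if_gt_eq_max, ← hA]
          refine ⟨rfl, ?_⟩
          intro l' r' p' v hv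
          rw [PySem.Dict.get?_insert] at hv
          split_ifs at hv with heq
          · obtain ⟨h1, h2, h3⟩ : l' = l ∧ r' = r ∧ p' = p := by simpa using heq
            subst h1; subst h2; subst h3
            exact (Option.some.inj hv).symm
          · exact i2 l' r' p' v hv
        · simp only [hc1, hc2, if_false] at hA ⊢
          rw [pv_if_gt_eq_max, ← hA]
          refine ⟨rfl, ?_⟩
          intro l' r' p' v hv
          rw [PySem.Dict.get?_insert] at hv
          split_ifs at hv with heq
          · obtain ⟨h1, h2, h3⟩ : l' = l ∧ r' = r ∧ p' = p := by simpa using heq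
            subst h1; subst h2; subst h3
            exact (Option.some.inj hv).symm
          · exact hm l' r' p' v hv

theorem pvGo_correct (arr : List Int) (l r p : Int) (m : PySem.Dict (Int × Int × Int) Int)
    (hm : pvInv arr m) :
    (pvGo arr l r p m).1 = longest_sequence_recursive arr l r p ∧ pvInv arr (pvGo arr l r p m).2 := by
  exact pvGo_aux arr ((r - l + 1).toNat) l r p m le_rfl hm

theorem longest_sequence_recursive_spec : Claim_equal_longest_sequence_recursive := by
  intro arr left right prev _ _
  unfold Spec_longest_sequence_recursive longest_sequence_recursive_alt
  have h := pvGo_correct arr left right prev PySem.Dict.empty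
    (by intro l r p v h; simp [PySem.Dict.get?_empty] at h)
  exact h.1.symm
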